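-- pv_equiv track=rewrite | github.com/Language-Power/Replication_Augmented | Core/TransferSociologist/utils.py | reunite_labels
-- ===== SOURCE A (Python) =====
-- from collections import deque
--
-- def reunite_labels(kept_labels):
--     if kept_labels == []:
--         return []
--     new_labels = []
--     stack = deque(reversed(kept_labels))
--     while len(stack)>1:
--         label = stack.pop()
--         next_label = stack.pop()
--         if   label[1] - next_label[0] in [0, 1] and label[2] == next_label[2]:
--             new_label = [label[0], next_label[1], label[2]]
--             stack.append(new_label)
--         else:
--             new_labels.append(label)
--             stack.append(next_label)
--     new_labels.append(stack[0])
--     return new_labels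
-- ===== SOURCE B (Python) =====
-- def reunite_labels(kept_labels):
--     if kept_labels == []:
--         return []
--     result = []
--     current = kept_labels[0]
--     for nxt in kept_labels[1:]:
--         if current[1] - nxt[0] in [0, 1] and current[2] == nxt[2]:
--             current = [current[0], nxt[1], current[2]]
--         else:
--             result.append(current)
--             current = nxt
--     result.append(current)
--     return result
-- ===== Notes on version B (the rewrite author's own statement) =====
-- stated objective: simpler
-- what changed: Replaces the deque-as-stack with pop/pop/push-back steps by a single forward scan that keeps one running 'current' label and appends it when the next label cannot be merged.
import Mathlib
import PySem

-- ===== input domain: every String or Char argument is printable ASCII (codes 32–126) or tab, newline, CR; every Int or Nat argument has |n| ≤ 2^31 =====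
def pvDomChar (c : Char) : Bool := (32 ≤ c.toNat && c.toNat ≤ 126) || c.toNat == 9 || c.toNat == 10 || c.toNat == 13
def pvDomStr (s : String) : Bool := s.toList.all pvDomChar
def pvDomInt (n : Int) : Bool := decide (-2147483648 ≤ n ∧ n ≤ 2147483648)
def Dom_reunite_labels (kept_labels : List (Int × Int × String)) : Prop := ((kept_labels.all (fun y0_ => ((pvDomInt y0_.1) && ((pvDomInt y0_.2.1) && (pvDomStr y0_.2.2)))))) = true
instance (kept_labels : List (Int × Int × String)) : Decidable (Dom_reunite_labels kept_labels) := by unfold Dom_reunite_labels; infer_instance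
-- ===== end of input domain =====

-- B replaces A's deque-as-stack (pop two, push merged result back) by a single
-- forward scan with one running 'current' accumulator; same output, simpler.

-- ===== PORT A =====
-- A's while-loop over the stack: the deque is modelled as a list whose head is
-- the pop() end (deque(reversed(kept_labels)) popped from the right yields the
-- labels in original order); new_labels is the accumulator `acc`.
def reuniteLoopA (acc : List (Int × Int × String)) (stack : List (Int × Int × String)) :
    List (Int × Int × String) :=
  match stack with
  | [] => acc                                  -- unreachable from a nonempty start
  | [x] => acc ++ [x]                          -- len(stack) ≤ 1: append stack[0]
  | label :: next_label :: rest =>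
      if (label.2.1 - next_label.1 = 0 ∨ label.2.1 - next_label.1 = 1) ∧
          label.2.2 = next_label.2.2 then
        reuniteLoopA acc ((label.1, next_label.2.1, label.2.2) :: rest)
      else
        reuniteLoopA (acc ++ [label]) (next_label :: rest)
termination_by stack.length
decreasing_by all_goals simp

def reunite_labels (kept_labels : List (Int × Int × String)) : List (Int × Int × String) :=
  if kept_labels = [] then [] else reuniteLoopA [] kept_labels

-- ===== PORT B =====
-- B's for-loop over kept_labels[1:] with running `current` and result list.
def reuniteLoopB (current : Int × Int × String) (result : List (Int × Int × String))
    (rest : List (Int × Int × String)) : List (Int × Int × String) :=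
  match rest with
  | [] => result ++ [current]
  | nxt :: rest' =>
      if (current.2.1 - nxt.1 = 0 ∨ current.2.1 - nxt.1 = 1) ∧
          current.2.2 = nxt.2.2 then
        reuniteLoopB (current.1, nxt.2.1, current.2.2) result rest'
      else
        reuniteLoopB nxt (result ++ [current]) rest'

def reunite_labels_alt (kept_labels : List (Int × Int × String)) : List (Int × Int × String) :=
  match kept_labels with
  | [] => []
  | h :: t => reuniteLoopB h [] t

-- ===== PRECONDITION & SPEC =====
def Spec_reunite_labels (kept_labels : List (Int × Int × String)) (out : List (Int × Int × String)) : Prop := out = reunite_labels_alt kept_labels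
instance (kept_labels : List (Int × Int × String)) (out : List (Int × Int × String)) : Decidable (Spec_reunite_labels kept_labels out) := by unfold Spec_reunite_labels; infer_instance

-- ===== CLAIM (what is proved, stated in full; the proofs are below) =====
def Claim_equal_reunite_labels : Prop := ∀ (kept_labels : List (Int × Int × String)), Dom_reunite_labels kept_labels → Spec_reunite_labels kept_labels (reunite_labels kept_labels)

-- ===== LEMMAS AND PROOFS =====
theorem loopA_eq_loopB (rest : List (Int × Int × String)) :
    ∀ (cur : Int × Int × String) (acc : List (Int × Int × String)),
      reuniteLoopA acc (cur :: rest) = reuniteLoopB cur acc rest := by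
  induction rest with
  | nil => intro cur acc; simp [reuniteLoopA, reuniteLoopB]
  | cons nxt rest' ih =>
      intro cur acc
      simp only [reuniteLoopA, reuniteLoopB]
      split_ifs <;> exact ih _ _

-- ===== VERDICT (by name: the statement is the Claim_ definition above) =====
theorem reunite_labels_spec : Claim_equal_reunite_labels := by
  intro kept_labels _
  unfold Spec_reunite_labels reunite_labels reunite_labels_alt
  cases kept_labels with
  | nil => rfl
  | cons h t => simp [loopA_eq_loopB]
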